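-- pv_equiv track=rewrite | github.com/Benny7075/Abalone1.0 | venv/Scripts/Abalone.main.py | get_board_from_level
-- ===== SOURCE A (Python) =====
-- def get_board_from_level(level):
--     for i in range(62):
--         if i == level:
--             if level < 6:
--                 return 3, 2 + i
--             if level >= 6 and level < 12:
--                 return 4, i - 4
--             if level >= 12 and level < 19:
--                 return 5, i - 10
--             if level >= 19 and level < 27:
--                 return 6, i - 17
--             if level >= 27 and level < 36:
--                 return 7, i - 25
--             if level >= 36 and level < 44:
--                 return 8, i - 34
--             if level >= 44 and level < 51:
--                 return 9, i - 42
--             if level >= 51 and level < 57: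
--                 return 10, i - 49
--             if level >= 57:
--                 return 11, i - 55
-- ===== SOURCE B (Python) =====
-- def get_board_from_level(level):
--     # Walk the row widths, consuming the level into a within-row position.
--     # Offsets are uniformly rem + 2, so no per-row base constants are needed.
--     if level not in range(62):
--         return None
--     rem = int(level)
--     for row, size in enumerate((6, 6, 7, 8, 9, 8, 7, 6, 5), start=3):
--         if rem < size:
--             return row, rem + 2
--         rem -= size
-- ===== Notes on version B (the rewrite author's own statement) =====
-- stated objective: simpler
-- what changed: Replaced A's linear scan with a nine-branch bucket cascade (distinct offset base per bucket) by an accumulator walk over the row widths (6,6,7,8,9,8,7,6,5): the level is consumed row by row and the offset is uniformly the within-row remainder plus a fixed shift, eliminating all per-row base constants.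
import Mathlib
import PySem

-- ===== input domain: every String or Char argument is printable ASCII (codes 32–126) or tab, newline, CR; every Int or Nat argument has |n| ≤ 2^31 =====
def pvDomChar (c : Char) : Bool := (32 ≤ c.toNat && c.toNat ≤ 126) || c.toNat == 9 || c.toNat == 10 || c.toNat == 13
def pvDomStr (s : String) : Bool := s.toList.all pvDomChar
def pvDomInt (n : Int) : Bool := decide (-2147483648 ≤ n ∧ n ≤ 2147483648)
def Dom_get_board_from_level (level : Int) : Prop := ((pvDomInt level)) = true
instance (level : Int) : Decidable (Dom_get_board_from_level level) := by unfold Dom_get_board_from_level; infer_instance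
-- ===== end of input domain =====

-- B replaces A's scan-plus-bucket-cascade by an accumulator walk over the row widths with a uniform offset rem + 2 (simpler).

-- ===== PORT A =====
-- the body of A's if-cascade once i == level has matched
def pvInner (level i : Int) : Option (Int × Int) :=
  if level < 6 then some (3, 2 + i)
  else if level ≥ 6 ∧ level < 12 then some (4, i - 4)
  else if level ≥ 12 ∧ level < 19 then some (5, i - 10)
  else if level ≥ 19 ∧ level < 27 then some (6, i - 17)
  else if level ≥ 27 ∧ level < 36 then some (7, i - 25)
  else if level ≥ 36 ∧ level < 44 then some (8, i - 34)
  else if level ≥ 44 ∧ level < 51 then some (9, i - 42)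
  else if level ≥ 51 ∧ level < 57 then some (10, i - 49)
  else if level ≥ 57 then some (11, i - 55)
  else none   -- unreachable inside the loop match; Python would fall through to the next iteration, but no i reaches here

-- 'for i in range(62): if i == level: <cascade>', implicit 'return None' at the end
def pvLoopA (level : Int) : List Int → Option (Int × Int)
  | [] => none
  | i :: rest => if i == level then pvInner level i else pvLoopA level rest

def get_board_from_level (level : Int) : Option (Int × Int) :=
  pvLoopA level (PySem.List.pyRange 0 62 1)

-- ===== PORT B =====
-- (row, width) pairs, as produced by Source B's enumerate over the widths tuple
def pvRowWidths : List (Int × Int) :=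
  [(3, 6), (4, 6), (5, 7), (6, 8), (7, 9), (8, 8), (9, 7), (10, 6), (11, 5)]

-- Source B's loop: consume rem row by row; first row whose width exceeds rem wins
def pvLoopB (rem : Int) : List (Int × Int) → Option (Int × Int)
  | [] => none
  | (row, size) :: rest => if rem < size then some (row, rem + 2) else pvLoopB (rem - size) rest

def get_board_from_level_alt (level : Int) : Option (Int × Int) :=
  if 0 ≤ level ∧ level < 62 then pvLoopB level pvRowWidths else none

-- ===== PRECONDITION & SPEC =====
def Spec_get_board_from_level (level : Int) (out : Option (Int × Int)) : Prop := out = get_board_from_level_alt level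
instance (level : Int) (out : Option (Int × Int)) : Decidable (Spec_get_board_from_level level out) := by unfold Spec_get_board_from_level; infer_instance

-- ===== CLAIM =====
def Claim_equal_get_board_from_level : Prop := ∀ (level : Int), Dom_get_board_from_level level → Spec_get_board_from_level level (get_board_from_level level)

-- ===== LEMMAS AND PROOFS =====
lemma pvLoopA_none (level : Int) (l : List Int) (h : ∀ i ∈ l, i ≠ level) :
    pvLoopA level l = none := by
  induction l with
  | nil => rfl
  | cons i rest ih =>
      simp only [pvLoopA]
      rw [if_neg (by simpa using h i (by simp))]
      exact ih fun j hj => h j (by simp [hj])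

-- ===== VERDICT =====
theorem get_board_from_level_spec : Claim_equal_get_board_from_level := by
  intro level _
  unfold Spec_get_board_from_level
  by_cases h : 0 ≤ level ∧ level < 62
  · obtain ⟨h0, h1⟩ := h
    interval_cases level <;> decide
  · have hA : get_board_from_level level = none := by
      unfold get_board_from_level
      exact pvLoopA_none level _ fun i hi => by
        rw [PySem.List.mem_pyRange_one] at hi; omega
    have hB : get_board_from_level_alt level = none := by
      unfold get_board_from_level_alt
      rw [if_neg h]
    rw [hA, hB]
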